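-- pv_equiv track=rewrite | github.com/hartmaj2/plat-arch-solids-coloring | Code/coloring_plots.py | get_coloring_dict
-- ===== SOURCE A (Python) =====
-- COLORS_TO_USE = ["#FF0000","#00FF00","#0000FF","#FFFF00","#FF00FF","#00FFFF","#FFFFFF","#000000"]
--
-- def get_coloring_dict(clring_as_list : list[int]) -> dict[str,list]:
--     clring_dict = {}
--     for i,c_ind in enumerate(clring_as_list):
--         clr = COLORS_TO_USE[c_ind]
--         if clr not in clring_dict:
--             clring_dict[clr] = []
--         clring_dict[clr].append(i)
--     return clring_dict
-- ===== SOURCE B (Python) =====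
-- COLORS_TO_USE = ["#FF0000","#00FF00","#0000FF","#FFFF00","#FF00FF","#00FFFF","#FFFFFF","#000000"]
--
-- def get_coloring_dict(clring_as_list):
--     colors = [COLORS_TO_USE[c] for c in clring_as_list]
--     return {clr: [i for i, c in enumerate(colors) if c == clr]
--             for clr in dict.fromkeys(colors)}
-- ===== Notes on version B (the rewrite author's own statement) =====
-- stated objective: alternative
-- what changed: Replaces the incremental dict-building loop by resolving all colors up front, deduplicating them in first-occurrence order, and building each group with a separate index scan per distinct color.
import Mathlib
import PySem

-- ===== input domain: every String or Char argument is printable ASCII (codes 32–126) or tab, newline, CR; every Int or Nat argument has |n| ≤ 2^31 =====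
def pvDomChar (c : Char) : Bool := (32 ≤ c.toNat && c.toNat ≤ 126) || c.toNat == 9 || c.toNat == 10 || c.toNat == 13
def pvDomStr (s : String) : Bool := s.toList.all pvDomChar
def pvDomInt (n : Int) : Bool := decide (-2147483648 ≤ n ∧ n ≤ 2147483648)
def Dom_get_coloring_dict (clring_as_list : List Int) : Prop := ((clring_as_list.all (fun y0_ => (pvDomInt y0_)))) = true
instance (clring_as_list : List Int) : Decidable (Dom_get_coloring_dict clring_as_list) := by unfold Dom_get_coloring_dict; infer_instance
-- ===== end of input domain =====

-- B resolves all colors up front, deduplicates them in first-occurrence order, and collects each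
-- group by a separate index scan per distinct color, instead of A's incremental dict-building loop.


def pvColors : List String :=
  ["#FF0000","#00FF00","#0000FF","#FFFF00","#FF00FF","#00FFFF","#FFFFFF","#000000"]

-- ===== PORT A =====
-- A: one pass over enumerate, growing a dict of index lists; 'COLORS_TO_USE[c_ind]' is
-- pyGetD, exact under Pre_ (out-of-range indices raise IndexError and are excluded by Pre_).
def get_coloring_dict (clring_as_list : List Int) : List (String × List Int) :=
  ((PySem.List.enumerate clring_as_list).foldl
    (fun d (p : Int × Int) =>
      let clr := PySem.List.pyGetD pvColors p.2 ""
      let d' := if d.contains clr then d else d.insert clr ([] : List Int)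
      d'.insert clr (d'.getD clr [] ++ [p.1]))
    PySem.Dict.empty).items

-- ===== PORT B =====
-- B: resolve all colors, dedup in first-occurrence order, one filter scan per distinct color.
def get_coloring_dict_alt (clring_as_list : List Int) : List (String × List Int) :=
  let colors := clring_as_list.map (fun c => PySem.List.pyGetD pvColors c "")
  (PySem.List.dedup colors).map (fun clr =>
    (clr, ((PySem.List.enumerate colors).filter (fun p => p.2 == clr)).map (·.1)))

-- ===== PRECONDITION & SPEC =====
-- Pre_: every color index is in range for the 8-element COLORS_TO_USE; Python A (and B) raise
-- IndexError on any other index, so exactly those inputs are excluded.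
def Pre_get_coloring_dict (clring_as_list : List Int) : Prop :=
  ∀ c ∈ clring_as_list, PySem.Raise.InRange pvColors.length c
instance (clring_as_list : List Int) : Decidable (Pre_get_coloring_dict clring_as_list) := by unfold Pre_get_coloring_dict; infer_instance
def pvWitness_get_coloring_dict : List Int := [0, 1, 0, -8, 7, 1]

def Spec_get_coloring_dict (clring_as_list : List Int) (out : List (String × List Int)) : Prop := out = get_coloring_dict_alt clring_as_list
instance (clring_as_list : List Int) (out : List (String × List Int)) : Decidable (Spec_get_coloring_dict clring_as_list out) := by unfold Spec_get_coloring_dict; infer_instance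

-- ===== CLAIM (what is proved, stated in full; the proofs are below) =====
def Claim_equal_get_coloring_dict : Prop := ∀ (clring_as_list : List Int), Dom_get_coloring_dict clring_as_list → Pre_get_coloring_dict clring_as_list → Spec_get_coloring_dict clring_as_list (get_coloring_dict clring_as_list)

-- ===== LEMMAS AND PROOFS =====

-- A's loop body (conditional fresh-insert, then append) is exactly Dict.modify.
theorem step_eq_modify (d : PySem.Dict String (List Int)) (k : String) (i : Int) :
    (let d' := if d.contains k then d else d.insert k ([] : List Int)
     d'.insert k (d'.getD k [] ++ [i])) = d.modify k [] (· ++ [i]) := by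
  show (if d.contains k then d else d.insert k ([] : List Int)).insert k
      ((if d.contains k then d else d.insert k ([] : List Int)).getD k [] ++ [i]) = _
  by_cases h : d.contains k = true
  · simp [h, PySem.Dict.modify]
  · have h' : d.contains k = false := by simpa using h
    simp [h, PySem.Dict.modify, PySem.Dict.insert_insert_self,
      PySem.Dict.getD_of_not_contains d [] h']

theorem map_key_enumerate {α β : Type} (f : α → β) (l : List α) (s : Int) :
    (PySem.List.enumerate l s).map (fun p => f p.2) = l.map f := by
  induction l generalizing s with
  | nil => rfl
  | cons x xs ih => simp [PySem.List.enumerate_cons, ih]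

theorem enumerate_map_snd {α β : Type} (f : α → β) (l : List α) (s : Int) :
    PySem.List.enumerate (l.map f) s
      = (PySem.List.enumerate l s).map (fun p => (p.1, f p.2)) := by
  induction l generalizing s with
  | nil => rfl
  | cons x xs ih => simp [PySem.List.enumerate_cons, ih]

theorem get_coloring_dict_eq_alt (l : List Int) :
    get_coloring_dict l = get_coloring_dict_alt l := by
  unfold get_coloring_dict get_coloring_dict_alt
  set key : Int → String := fun c => PySem.List.pyGetD pvColors c "" with hkey
  set e := PySem.List.enumerate l 0 with he
  have hbody : (fun (d : PySem.Dict String (List Int)) (p : Int × Int) =>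
      let clr := key p.2
      let d' := if d.contains clr then d else d.insert clr ([] : List Int)
      d'.insert clr (d'.getD clr [] ++ [p.1]))
      = (fun d p => d.modify (key p.2) [] (· ++ [p.1])) := by
    funext d p; exact step_eq_modify d (key p.2) p.1
  rw [show (PySem.List.enumerate l).foldl
      (fun (d : PySem.Dict String (List Int)) (p : Int × Int) =>
        let clr := key p.2
        let d' := if d.contains clr then d else d.insert clr ([] : List Int)
        d'.insert clr (d'.getD clr [] ++ [p.1])) PySem.Dict.empty
      = e.foldl (fun d p => d.modify (key p.2) [] (· ++ [p.1])) PySem.Dict.empty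
    from by rw [hbody]]
  have hfold : e.foldl (fun d p => d.modify (key p.2) [] (· ++ [p.1])) PySem.Dict.empty
      = (e.map (fun p => (key p.2, p.1))).foldl
          (fun d (q : String × Int) => d.modify q.1 [] (· ++ [q.2])) PySem.Dict.empty := by
    rw [List.foldl_map]
  rw [hfold]
  set l2 := e.map (fun p => (key p.2, p.1)) with hl2
  set D := l2.foldl (fun d (q : String × Int) => d.modify q.1 [] (· ++ [q.2])) PySem.Dict.empty with hD
  have hnodup : D.keys.Nodup := by
    rw [hD]
    exact PySem.Dict.nodup_keys_foldl_modify_key l2 (fun q => q.1) [] (fun d q => (· ++ [q.2])) _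
      (by simp [PySem.Dict.keys_empty])
  rw [PySem.Dict.items_eq_map_keys D hnodup ([] : List Int)]
  have hkeys : D.keys = PySem.List.dedup (l.map key) := by
    rw [hD, PySem.Dict.keys_foldl_modify_key l2 (fun q => q.1) [] (fun d q => (· ++ [q.2]))
      PySem.Dict.empty]
    have hm : l2.map (fun q => q.1) = l.map key := by
      rw [hl2, List.map_map, he]
      exact map_key_enumerate key l 0
    rw [hm]
    simp [PySem.Set.update, PySem.Set.ofList]
  rw [hkeys]
  apply List.map_congr_left
  intro c _
  congr 1
  have hgetD : D.getD c [] = (l2.filter (fun q => q.1 == c)).map (·.2) := by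
    rw [hD, PySem.Dict.getD_foldl_modify_append]
    simp
  rw [hgetD, hl2, he, enumerate_map_snd key l 0, List.filter_map, List.filter_map,
    List.map_map, List.map_map]
  rfl

-- ===== VERDICT (by name: the statement is the Claim_ definition above) =====
theorem get_coloring_dict_spec : Claim_equal_get_coloring_dict := by
  intro l _ _
  exact get_coloring_dict_eq_alt l
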